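-- pv_equiv track=rewrite | github.com/Ele91463/Algorithms-for-Bioinformatics | Smith-Waterman algorithm - Eleonora Giuliani.py | is_matches
-- ===== SOURCE A (Python) =====
-- def is_matches(align_seq1, align_seq2, length_match):
--     max_match = 0
--     consecut = 0
--     length_a = False
--
--     for a, b in zip(align_seq1, align_seq2):
--         if a == b:
--             consecut += 1
--             if consecut > max_match:
--                 max_match = consecut
--             if consecut >= length_match:
--                 length_a = True
--         else:
--             consecut = 0
--
--     return length_a, max_match
-- ===== SOURCE B (Python) =====
-- def is_matches(align_seq1, align_seq2, length_match):
--     # Build the per-position equality stream, collect the lengths of the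
--     # consecutive-match runs with a two-pointer scan, then reduce.
--     eqs = [a == b for a, b in zip(align_seq1, align_seq2)]
--     n = len(eqs)
--     runs = []
--     i = 0
--     while i < n:
--         if eqs[i]:
--             j = i
--             while j < n and eqs[j]:
--                 j += 1
--             runs.append(j - i)
--             i = j
--         else:
--             i += 1
--     max_match = max(runs, default=0)
--     return max_match >= max(length_match, 1), max_match
-- ===== Notes on version B (the rewrite author's own statement) =====
-- stated objective: alternative
-- what changed: B builds the list of consecutive-match run lengths with a two-pointer scan over the equality stream and then reduces it (max with default 0, flag = max_match >= max(length_match,1)), instead of A's single loop with running counter, running max and flag updates.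
import Mathlib
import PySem

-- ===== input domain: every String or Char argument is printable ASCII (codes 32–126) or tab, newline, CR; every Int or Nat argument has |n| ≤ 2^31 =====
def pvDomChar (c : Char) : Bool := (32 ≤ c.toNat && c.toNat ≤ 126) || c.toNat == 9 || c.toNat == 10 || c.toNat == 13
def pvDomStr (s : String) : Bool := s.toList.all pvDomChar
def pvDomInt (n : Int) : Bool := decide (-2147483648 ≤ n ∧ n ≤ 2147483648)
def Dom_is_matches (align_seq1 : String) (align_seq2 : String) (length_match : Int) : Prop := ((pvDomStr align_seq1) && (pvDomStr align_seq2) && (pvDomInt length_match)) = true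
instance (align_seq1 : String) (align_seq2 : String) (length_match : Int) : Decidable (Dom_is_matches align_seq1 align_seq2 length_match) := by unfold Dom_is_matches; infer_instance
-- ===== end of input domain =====

-- B collects the consecutive-match run lengths first and then reduces them,
-- instead of A's single running-counter loop; same cost, different decomposition.

-- ===== PORT A =====
-- state = (max_match, consecut, length_a), updated exactly as A's loop body does
def is_matches (align_seq1 : String) (align_seq2 : String) (length_match : Int) : Bool × Int :=
  let st := (List.zip align_seq1.toList align_seq2.toList).foldl
    (fun (st : Int × Int × Bool) p =>
      if p.1 == p.2 then
        let c := st.2.1 + 1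
        let mm := if c > st.1 then c else st.1
        let la := if c ≥ length_match then true else st.2.2
        (mm, c, la)
      else (st.1, 0, st.2.2)) (0, 0, false)
  (st.2.2, st.1)

-- ===== PORT B =====
-- inner 'while j < n and eqs[j]: j += 1' of Source B: length of the leading True run and the remainder
def pvCountLead : List Bool → Int × List Bool
  | true :: es => let r := pvCountLead es; (r.1 + 1, r.2)
  | es => (0, es)

theorem pvCountLead_len_le (es : List Bool) : (pvCountLead es).2.length ≤ es.length := by
  induction es with
  | nil => simp [pvCountLead]
  | cons e es ih => cases e <;> simp [pvCountLead] <;> omega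

-- outer while-loop of Source B: the list of consecutive-True run lengths
def pvTrueRuns : List Bool → List Int
  | [] => []
  | false :: es => pvTrueRuns es
  | true :: es => ((pvCountLead es).1 + 1) :: pvTrueRuns (pvCountLead es).2
termination_by es => es.length
decreasing_by
  · simp
  · have := pvCountLead_len_le es; simp; omega

def is_matches_alt (align_seq1 : String) (align_seq2 : String) (length_match : Int) : Bool × Int :=
  let eqs := (List.zip align_seq1.toList align_seq2.toList).map (fun p => p.1 == p.2)
  let max_match := PySem.List.maxD (pvTrueRuns eqs) (fun x => x) 0
  (decide (max_match ≥ max length_match 1), max_match)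

-- ===== PRECONDITION & SPEC =====
def Spec_is_matches (align_seq1 : String) (align_seq2 : String) (length_match : Int) (out : Bool × Int) : Prop := out = is_matches_alt align_seq1 align_seq2 length_match
instance (align_seq1 : String) (align_seq2 : String) (length_match : Int) (out : Bool × Int) : Decidable (Spec_is_matches align_seq1 align_seq2 length_match out) := by unfold Spec_is_matches; infer_instance

-- ===== CLAIM (what is proved, stated in full; the proofs are below) =====
def Claim_equal_is_matches : Prop := ∀ (align_seq1 : String) (align_seq2 : String) (length_match : Int), Dom_is_matches align_seq1 align_seq2 length_match → Spec_is_matches align_seq1 align_seq2 length_match (is_matches align_seq1 align_seq2 length_match)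

-- ===== LEMMAS AND PROOFS =====

-- max of the running counter over all positions after a match step, starting from count c
def pvH : Int → List Bool → Int
  | _, [] => 0
  | c, true :: es => max (c + 1) (pvH (c + 1) es)
  | c, false :: es => pvH 0 es

-- A's loop body as a named function of the equality bit (defeq to the lambda in is_matches)
def pvStepA (L : Int) (st : Int × Int × Bool) (e : Bool) : Int × Int × Bool :=
  if e then
    (if st.2.1 + 1 > st.1 then st.2.1 + 1 else st.1, st.2.1 + 1,
      if st.2.1 + 1 ≥ L then true else st.2.2)
  else (st.1, 0, st.2.2)

theorem pvH_nonneg (es : List Bool) : ∀ c, 0 ≤ pvH c es := by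
  induction es with
  | nil => intro c; simp [pvH]
  | cons e es ih => intro c; cases e <;> simp [pvH] <;> [exact ih 0; exact Or.inr (ih (c+1))]

theorem pvCountLead_nonneg (es : List Bool) : 0 ≤ (pvCountLead es).1 := by
  induction es with
  | nil => simp [pvCountLead]
  | cons e es ih => cases e <;> simp [pvCountLead] <;> omega

theorem pvCountLead_spec (es : List Bool) : ∀ c : Int, 0 ≤ c →
    max c (pvH c es) = max (c + (pvCountLead es).1) (pvH 0 (pvCountLead es).2) := by
  induction es with
  | nil => intro c hc; simp [pvCountLead, pvH]
  | cons e es ih =>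
    intro c hc
    cases e with
    | false => simp [pvCountLead, pvH]
    | true =>
      have h1 := ih (c + 1) (by omega)
      have h2 := pvH_nonneg es (c + 1)
      simp only [pvCountLead, pvH]
      have h3 : max c (max (c + 1) (pvH (c + 1) es)) = max (c + 1) (pvH (c + 1) es) := by omega
      rw [h3, h1]; ring_nf

theorem pvTrueRuns_nonneg (es : List Bool) : ∀ x ∈ pvTrueRuns es, 0 ≤ x := by
  induction es using pvTrueRuns.induct with
  | case1 => simp [pvTrueRuns]
  | case2 es ih => simpa [pvTrueRuns] using ih
  | case3 es ih =>
    have := pvCountLead_nonneg es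
    simp only [pvTrueRuns, List.mem_cons]
    rintro x (rfl | hx)
    · omega
    · exact ih x hx

theorem pvTrueRuns_fold (es : List Bool) : ∀ a : Int, 0 ≤ a →
    (pvTrueRuns es).foldl max a = max a (pvH 0 es) := by
  induction es using pvTrueRuns.induct with
  | case1 => intro a ha; simp [pvTrueRuns, pvH]; omega
  | case2 es ih => intro a ha; simpa [pvTrueRuns, pvH] using ih a ha
  | case3 es ih =>
    intro a ha
    have hn := pvCountLead_nonneg es
    have hcl := pvCountLead_spec es 1 (by omega)
    have h2 := pvH_nonneg es 1
    simp only [pvTrueRuns, pvH, List.foldl_cons, show (0:Int) + 1 = 1 from rfl]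
    rw [ih (max a ((pvCountLead es).1 + 1)) (by omega)]
    omega

-- A's loop over the equality stream, characterised by pvH
theorem pvFoldA (L : Int) (es : List Bool) : ∀ (mm c : Int) (la : Bool), 0 ≤ c → 0 ≤ mm →
    (es.foldl (pvStepA L) (mm, c, la)).1 = max mm (pvH c es) ∧
    (es.foldl (pvStepA L) (mm, c, la)).2.2 = (la || decide (max L 1 ≤ pvH c es)) := by
  induction es with
  | nil =>
    intro mm c la hc hmm
    constructor
    · simp [pvH]; omega
    · have h0 : ¬ (max L 1 ≤ (0:Int)) := by omega
      simp [pvH, h0]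
  | cons e es ih =>
    intro mm c la hc hmm
    cases e with
    | false =>
      simpa [pvStepA, pvH] using ih mm 0 la le_rfl hmm
    | true =>
      have h2 := pvH_nonneg es (c + 1)
      have hstep : pvStepA L (mm, c, la) true
          = (if c + 1 > mm then c + 1 else mm, c + 1, if c + 1 ≥ L then true else la) := rfl
      rw [List.foldl_cons, hstep]
      obtain ⟨ih1, ih2⟩ := ih (if c + 1 > mm then c + 1 else mm) (c + 1)
        (if c + 1 ≥ L then true else la) (by omega) (by split_ifs <;> omega)
      constructor
      · rw [ih1]
        simp only [pvH]
        split_ifs <;> omega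
      · rw [ih2]
        simp only [pvH]
        have hiff : (max L 1 ≤ max (c + 1) (pvH (c + 1) es))
            ↔ (L ≤ c + 1 ∨ max L 1 ≤ pvH (c + 1) es) := by omega
        by_cases h : L ≤ c + 1
        · simp [ge_iff_le, h]
          exact Or.inr (Or.inl hc)
        · have heq : (max L 1 ≤ max (c + 1) (pvH (c + 1) es))
              ↔ (max L 1 ≤ pvH (c + 1) es) := by omega
          simp [ge_iff_le, h, heq]

theorem pvMaxD_id (l : List Int) (h : ∀ x ∈ l, 0 ≤ x) :
    PySem.List.maxD l (fun x => x) 0 = l.foldl max 0 := by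
  cases l with
  | nil =>
    simp [PySem.List.maxD, PySem.List.max?]
  | cons x t =>
    have hx : max 0 x = x := by have := h x (by simp); omega
    simp [PySem.List.maxD, PySem.List.max?_id_cons, hx]

-- ===== VERDICT (by name: the statement is the Claim_ definition above) =====
theorem is_matches_spec : Claim_equal_is_matches := by
  intro s1 s2 L _
  show is_matches s1 s2 L = is_matches_alt s1 s2 L
  unfold is_matches is_matches_alt
  have hfold :
      (List.zip s1.toList s2.toList).foldl
        (fun (st : Int × Int × Bool) p =>
          if p.1 == p.2 then
            let c := st.2.1 + 1
            let mm := if c > st.1 then c else st.1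
            let la := if c ≥ L then true else st.2.2
            (mm, c, la)
          else (st.1, 0, st.2.2)) (0, 0, false)
      = ((List.zip s1.toList s2.toList).map (fun p => p.1 == p.2)).foldl (pvStepA L)
          (0, 0, false) := by
    rw [List.foldl_map]
    rfl
  set eqs := (List.zip s1.toList s2.toList).map (fun p => p.1 == p.2) with heqs
  have hnn := pvH_nonneg eqs 0
  obtain ⟨h1, h3⟩ := pvFoldA L eqs 0 0 false le_rfl le_rfl
  have hmax0 : max (0:Int) (pvH 0 eqs) = pvH 0 eqs := by omega
  simp only [hfold, pvMaxD_id _ (pvTrueRuns_nonneg eqs), pvTrueRuns_fold eqs 0 le_rfl,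
    hmax0, h1, h3, Bool.false_or]
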